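-- pv_equiv track=rewrite | github.com/milenamilosa/python | leuven_functions_in_functions/lab9_ex2_start.py | find_plants_with_label
-- ===== SOURCE A (Python) =====
-- def find_plants_with_label( plant_list, label_list, searched_label ):#
--     searched_label_indices = []
--     searched_plants = []
--     index = [i for i, x in enumerate(label_list) if x == searched_label]
--     searched_label_indices = searched_label_indices + index
--     for j in searched_label_indices:
--         searched_plant = plant_list[j]
--         searched_plants = searched_plants + [searched_plant]
--
--     return searched_plants
-- ===== SOURCE B (Python) =====
-- def find_plants_with_label(plant_list, label_list, searched_label):
--     groups = {}
--     for plant, label in zip(plant_list, label_list):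
--         groups.setdefault(label, []).append(plant)
--     return groups.get(searched_label, [])
-- ===== Notes on version B (the rewrite author's own statement) =====
-- stated objective: alternative
-- what changed: B groups plants by label in one pass over zip(plant_list, label_list) into a dictionary and answers with a single lookup, instead of A's two phases (build a list of matching indices, then a gather loop indexing plant_list with repeated list concatenation).
import Mathlib
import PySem

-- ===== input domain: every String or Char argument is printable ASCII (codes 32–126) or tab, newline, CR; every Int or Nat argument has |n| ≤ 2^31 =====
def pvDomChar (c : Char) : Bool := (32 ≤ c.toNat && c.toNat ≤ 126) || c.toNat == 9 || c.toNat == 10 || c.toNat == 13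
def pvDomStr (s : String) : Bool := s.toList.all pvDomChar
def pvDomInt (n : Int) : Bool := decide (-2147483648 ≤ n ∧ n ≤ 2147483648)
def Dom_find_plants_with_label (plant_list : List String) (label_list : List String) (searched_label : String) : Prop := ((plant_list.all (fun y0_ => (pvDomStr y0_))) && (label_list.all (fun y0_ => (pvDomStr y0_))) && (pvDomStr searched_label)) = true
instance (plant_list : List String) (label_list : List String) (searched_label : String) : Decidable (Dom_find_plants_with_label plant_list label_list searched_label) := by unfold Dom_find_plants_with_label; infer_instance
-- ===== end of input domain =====

-- B groups plants by label in one pass over zip(plant_list, label_list) into a dict and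
-- answers with one lookup, replacing A's index-list-then-gather phases; objective: alternative.


-- ===== PORT A =====
def find_plants_with_label (plant_list : List String) (label_list : List String) (searched_label : String) : List String :=
  let searched_label_indices : List Int := []
  let index : List Int := ((PySem.List.enumerate label_list 0).filter (fun p => p.2 == searched_label)).map (·.1)
  let searched_label_indices := searched_label_indices ++ index
  searched_label_indices.foldl
    (fun searched_plants j =>
      let searched_plant := (PySem.List.pyGet? plant_list j).getD ""  -- IndexError excluded by Pre_
      searched_plants ++ [searched_plant]) []

-- ===== PORT B =====
def find_plants_with_label_alt (plant_list : List String) (label_list : List String) (searched_label : String) : List String :=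
  let groups :=
    (plant_list.zip label_list).foldl
      (fun g p => g.modify p.2 [] (fun v => v ++ [p.1]))  -- groups.setdefault(label, []).append(plant)
      PySem.Dict.empty
  groups.getD searched_label []

-- ===== PRECONDITION & SPEC =====
-- Pre_ excludes exactly the inputs where Python A raises IndexError: a matching label at
-- position k with k out of range of plant_list.
def Pre_find_plants_with_label (plant_list : List String) (label_list : List String) (searched_label : String) : Prop :=
  ∀ k : Nat, (hk : k < label_list.length) → label_list[k] = searched_label → k < plant_list.length
instance (plant_list : List String) (label_list : List String) (searched_label : String) : Decidable (Pre_find_plants_with_label plant_list label_list searched_label) := by unfold Pre_find_plants_with_label; infer_instance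
def pvWitness_find_plants_with_label : List String × List String × String := (["rose", "oak"], ["flower", "tree"], "tree")

def Spec_find_plants_with_label (plant_list : List String) (label_list : List String) (searched_label : String) (out : List String) : Prop := out = find_plants_with_label_alt plant_list label_list searched_label
instance (plant_list : List String) (label_list : List String) (searched_label : String) (out : List String) : Decidable (Spec_find_plants_with_label plant_list label_list searched_label out) := by unfold Spec_find_plants_with_label; infer_instance

-- ===== CLAIM (what is proved, stated in full; the proofs are below) =====
def Claim_equal_find_plants_with_label : Prop := ∀ (plant_list : List String) (label_list : List String) (searched_label : String), Dom_find_plants_with_label plant_list label_list searched_label → Pre_find_plants_with_label plant_list label_list searched_label → Spec_find_plants_with_label plant_list label_list searched_label (find_plants_with_label plant_list label_list searched_label)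

-- ===== LEMMAS AND PROOFS =====

-- B's group-by fold, looked up at sl, yields what the fold has already stored for sl
-- followed by the plants of the remaining matching pairs.
theorem pv_groups_getD (sl : String) :
    ∀ (es : List (String × String)) (g : PySem.Dict String (List String)),
      ((es.foldl (fun g p => g.modify p.2 [] (fun v => v ++ [p.1])) g).getD sl []) =
        g.getD sl [] ++ (es.filter (fun p => p.2 == sl)).map (·.1) := by
  intro es
  induction es with
  | nil => intro g; simp
  | cons q qs ih =>
    intro g
    obtain ⟨x, y⟩ := q
    by_cases hq : y = sl
    · subst hq
      simp [List.foldl_cons, ih, PySem.Dict.getD_modify_self g y [] (fun v => v ++ [x])]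
    · simp [List.foldl_cons, ih, hq,
        PySem.Dict.getD_modify_of_ne g [] (fun v => v ++ [x]) (Ne.symm hq)]

-- A's gather over the matching indices equals the zip-filter view, under Pre_.
theorem pv_gather_eq_zip (sl : String) :
    ∀ (ll : List String) (n : Nat) (pl : List String),
      (∀ k : Nat, (hk : k < ll.length) → ll[k] = sl → n + k < pl.length) →
      (((PySem.List.enumerate ll (n : Int)).filter (fun p => p.2 == sl)).map (·.1)).map
          (fun j => (PySem.List.pyGet? pl j).getD "") =
        (((pl.drop n).zip ll).filter (fun p => p.2 == sl)).map (·.1) := by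
  intro ll
  induction ll with
  | nil => intro n pl _; simp [PySem.List.enumerate_nil]
  | cons a ll ih =>
    intro n pl h
    have hshift : ∀ k : Nat, (hk : k < ll.length) → ll[k] = sl → (n + 1) + k < pl.length := by
      intro k hk hlab
      have := h (k + 1) (by simp; omega) (by simpa using hlab)
      omega
    have hc : ((n : Int) + 1) = ((n + 1 : Nat) : Int) := by push_cast; ring
    have ihn := ih (n + 1) pl hshift
    rw [PySem.List.enumerate_cons]
    by_cases ha : a = sl
    · have hn : n < pl.length := by have := h 0 (by simp) (by simpa using ha); omega
      have hdrop : pl.drop n = pl[n] :: pl.drop (n + 1) := List.drop_eq_getElem_cons hn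
      have hcond : ((((n : Int), a)).2 == sl) = true := by simp [ha]
      rw [hdrop, List.zip_cons_cons]
      simp only [List.filter_cons, hcond, if_true, List.map_cons]
      rw [PySem.List.pyGet?_natCast, List.getElem?_eq_getElem hn, Option.getD_some, hc, ihn]
    · have hcond : ((((n : Int), a)).2 == sl) = false := by simp [ha]
      by_cases hn : n < pl.length
      · have hdrop : pl.drop n = pl[n] :: pl.drop (n + 1) := List.drop_eq_getElem_cons hn
        rw [hdrop, List.zip_cons_cons]
        simp only [List.filter_cons, hcond, Bool.false_eq_true, if_false]
        rw [hc]
        exact ihn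
      · have hd1 : pl.drop n = [] := List.drop_eq_nil_of_le (by omega)
        have hnil : (PySem.List.enumerate ll ((n + 1 : Nat) : Int)).filter
            (fun p => p.2 == sl) = [] := by
          rw [List.filter_eq_nil_iff]
          intro p hp
          rw [PySem.List.mem_enumerate_iff] at hp
          obtain ⟨k, hk, rfl⟩ := hp
          simp only [beq_iff_eq]
          intro hlab
          have := hshift k hk hlab
          omega
        simp only [List.filter_cons, hcond, Bool.false_eq_true, if_false, hd1]
        rw [hc, hnil]
        simp

-- ===== VERDICT (by name: the statement is the Claim_ definition above) =====
theorem find_plants_with_label_spec : Claim_equal_find_plants_with_label := by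
  intro pl ll sl _ hpre
  unfold Spec_find_plants_with_label find_plants_with_label find_plants_with_label_alt
  simp only [List.nil_append]
  rw [PySem.List.foldl_append_singleton_eq_map, List.nil_append,
    pv_groups_getD sl (pl.zip ll) PySem.Dict.empty]
  have := pv_gather_eq_zip sl ll 0 pl (by intro k hk hlab; simpa using hpre k hk hlab)
  simpa using this
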